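-- pv_equiv track=rewrite | github.com/diego-aquino/competitive-programming | OBI/2019/imperial/imperial.py | getMaxMarked
-- ===== SOURCE A (Python) =====
-- def getMaxMarked(n, numbers):
--    uniqueNumbers = getUniqueNumbers(numbers)
--
--    maxMarked = 0
--
--    marked = [0]
--    for i in range(len(uniqueNumbers)):
--       for j in range(i + 1, len(uniqueNumbers)):
--          for number in numbers:
--             if number == uniqueNumbers[i] or number == uniqueNumbers[j]:
--                if number != marked[-1]:
--                   marked.append(number)
--
--          if len(marked) - 1 > maxMarked:
--             maxMarked = len(marked) - 1
--
--          marked = [0]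
--
--    if maxMarked > 0:
--       return maxMarked
--    else:
--       return 1
--
-- def getUniqueNumbers(numbers):
--    uniqueNumbers = []
--
--    for number in numbers:
--       if number not in uniqueNumbers:
--          uniqueNumbers.append(number)
--
--    return uniqueNumbers
-- ===== SOURCE B (Python) =====
-- def getMaxMarked(n, numbers):
--     # Faster: dedup once, precompute per-value position lists, then count blocks
--     # per value-pair by a two-pointer merge of the two position lists.
--     order = list(dict.fromkeys(numbers))
--     positions = [[k for k, x in enumerate(numbers) if x == v] for v in order]
--     best = 0
--     for i in range(len(order)):
--         a = order[i]
--         pa = positions[i]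
--         for j in range(i + 1, len(order)):
--             b = order[j]
--             pb = positions[j]
--             cnt = 0
--             prev = 0
--             ia = ib = 0
--             while ia < len(pa) or ib < len(pb):
--                 if ib == len(pb) or (ia < len(pa) and pa[ia] < pb[ib]):
--                     v = a
--                     ia += 1
--                 else:
--                     v = b
--                     ib += 1
--                 if v != prev:
--                     cnt += 1
--                     prev = v
--             if cnt > best:
--                 best = cnt
--     return best if best > 0 else 1
-- ===== Notes on version B (the rewrite author's own statement) =====
-- stated objective: faster
-- what changed: Instead of rescanning the whole list for every pair of distinct values (A), B deduplicates once, precomputes each value's position list in one pass per value, and counts blocks for a pair by a two-pointer merge of the two position lists, so each pair costs only the two values' occurrence counts.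
import Mathlib
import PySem

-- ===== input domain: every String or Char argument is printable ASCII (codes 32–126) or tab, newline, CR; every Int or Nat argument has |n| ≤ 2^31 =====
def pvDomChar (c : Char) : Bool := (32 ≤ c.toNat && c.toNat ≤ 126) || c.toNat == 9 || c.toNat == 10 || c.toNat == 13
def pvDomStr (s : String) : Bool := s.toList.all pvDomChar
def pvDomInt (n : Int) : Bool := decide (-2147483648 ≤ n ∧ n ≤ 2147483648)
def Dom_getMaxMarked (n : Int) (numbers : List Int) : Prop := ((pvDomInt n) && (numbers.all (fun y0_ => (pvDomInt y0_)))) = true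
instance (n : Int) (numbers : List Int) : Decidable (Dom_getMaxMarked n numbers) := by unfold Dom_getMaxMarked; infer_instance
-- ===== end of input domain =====

-- B deduplicates once, precomputes each value's position list, and counts blocks per
-- value-pair by a two-pointer merge of the two position lists instead of rescanning
-- the whole list for every pair, as A does.  Objective: faster.

-- ===== PORT A =====
def getUniqueNumbersA (numbers : List Int) : List Int :=
  numbers.foldl (fun acc number => if number ∈ acc then acc else acc ++ [number]) []

def getMaxMarked (n : Int) (numbers : List Int) : Int :=
  let uniqueNumbers := getUniqueNumbersA numbers
  let res : Int × List Int :=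
    (PySem.List.pyRange 0 (uniqueNumbers.length : Int) 1).foldl (fun st i =>
      (PySem.List.pyRange (i + 1) (uniqueNumbers.length : Int) 1).foldl (fun st j =>
        let marked := numbers.foldl (fun marked number =>
          if number = PySem.List.pyGetD uniqueNumbers i 0 ∨
             number = PySem.List.pyGetD uniqueNumbers j 0 then
            if number ≠ PySem.List.pyGetD marked (-1) 0 then marked ++ [number] else marked
          else marked) st.2
        let maxMarked := if (marked.length : Int) - 1 > st.1 then (marked.length : Int) - 1 else st.1
        (maxMarked, ([0] : List Int))) st) (0, ([0] : List Int))
  if res.1 > 0 then res.1 else 1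

-- ===== PORT B =====
-- port of B's comprehension '[k for k, x in enumerate(numbers) if x == v]'
def posOf (numbers : List Int) (v : Int) : List Int :=
  ((PySem.List.enumerate numbers 0).filter (fun p => p.2 == v)).map (·.1)

-- port of B's while loop: two-pointer merge of the two position lists, counting
-- value changes (the two advancing pointers become structural consumption of the lists)
def mergeCount (a b : Int) : Int → List Int → List Int → Int
  | _, [], [] => 0
  | prev, [], _ :: tb =>
      if b ≠ prev then 1 + mergeCount a b b [] tb else mergeCount a b prev [] tb
  | prev, _ :: ta, [] =>
      if a ≠ prev then 1 + mergeCount a b a ta [] else mergeCount a b prev ta []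
  | prev, i :: ta, j :: tb =>
      if i < j then
        if a ≠ prev then 1 + mergeCount a b a ta (j :: tb) else mergeCount a b prev ta (j :: tb)
      else
        if b ≠ prev then 1 + mergeCount a b b (i :: ta) tb else mergeCount a b prev (i :: ta) tb
termination_by _ pa pb => pa.length + pb.length

def getMaxMarked_alt (n : Int) (numbers : List Int) : Int :=
  let order := PySem.List.dedup numbers
  let positions := order.map (posOf numbers)
  let best : Int :=
    (PySem.List.pyRange 0 (order.length : Int) 1).foldl (fun best i =>
      (PySem.List.pyRange (i + 1) (order.length : Int) 1).foldl (fun best j =>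
        let c := mergeCount (PySem.List.pyGetD order i 0) (PySem.List.pyGetD order j 0) 0
                   (PySem.List.pyGetD positions i []) (PySem.List.pyGetD positions j [])
        if c > best then c else best) best) 0
  if best > 0 then best else 1

-- ===== PRECONDITION & SPEC =====
def Spec_getMaxMarked (n : Int) (numbers : List Int) (out : Int) : Prop := out = getMaxMarked_alt n numbers
instance (n : Int) (numbers : List Int) (out : Int) : Decidable (Spec_getMaxMarked n numbers out) := by unfold Spec_getMaxMarked; infer_instance

-- ===== CLAIM (what is proved, stated in full; the proofs are below) =====
def Claim_equal_getMaxMarked : Prop := ∀ (n : Int) (numbers : List Int), Dom_getMaxMarked n numbers → Spec_getMaxMarked n numbers (getMaxMarked n numbers)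

-- ===== LEMMAS AND PROOFS =====

-- reference count of "blocks" of values a/b in xs, starting from last marked value prev
def cnt (a b prev : Int) : List Int → Int
  | [] => 0
  | x :: t => if x = a ∨ x = b then (if x ≠ prev then 1 + cnt a b x t else cnt a b prev t)
              else cnt a b prev t

-- positions (indices starting at k) of value v in xs
def posK (v k : Int) : List Int → List Int
  | [] => []
  | x :: t => if x = v then k :: posK v (k + 1) t else posK v (k + 1) t

lemma posK_ge (v : Int) : ∀ (xs : List Int) (k m : Int), m ∈ posK v k xs → k ≤ m := by
  intro xs
  induction xs with
  | nil => intro k m h; simp [posK] at h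
  | cons x t ih =>
      intro k m h
      simp only [posK] at h
      by_cases hx : x = v
      · simp [hx] at h
        rcases h with h | h
        · omega
        · have := ih (k + 1) m h; omega
      · simp [hx] at h
        have := ih (k + 1) m h; omega

lemma posOf_eq_posK (numbers : List Int) (v : Int) : posOf numbers v = posK v 0 numbers := by
  suffices h : ∀ (xs : List Int) (s : Int),
      ((PySem.List.enumerate xs s).filter (fun p => p.2 == v)).map (·.1) = posK v s xs by
    simpa [posOf] using h numbers 0
  intro xs
  induction xs with
  | nil => intro s; simp [PySem.List.enumerate_nil, posK]
  | cons x t ih =>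
      intro s
      by_cases hx : x = v
      · simp [PySem.List.enumerate_cons, posK, hx, ih]
      · simp [PySem.List.enumerate_cons, posK, hx, ih]

lemma mergeCount_eq_cnt (a b : Int) (hab : a ≠ b) :
    ∀ (xs : List Int) (k prev : Int),
      mergeCount a b prev (posK a k xs) (posK b k xs) = cnt a b prev xs := by
  intro xs
  induction xs with
  | nil => intro k prev; simp [posK, mergeCount, cnt]
  | cons x t ih =>
      intro k prev
      by_cases hxa : x = a
      · subst hxa
        have hxb : x ≠ b := hab
        rw [show posK x k (x :: t) = k :: posK x (k+1) t from by simp [posK],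
            show posK b k (x :: t) = posK b (k+1) t from by simp [posK, hxb]]
        rcases hpb : posK b (k + 1) t with _ | ⟨j, tb⟩
        · rw [mergeCount]
          rw [← hpb, ih (k + 1), ih (k + 1)]
          simp [cnt, hab]
        · have hkj : k < j := by
            have := posK_ge b t (k + 1) j (by rw [hpb]; exact List.mem_cons_self ..)
            omega
          rw [mergeCount, if_pos hkj]
          rw [← hpb, ih (k + 1), ih (k + 1)]
          simp [cnt, hab]
      · by_cases hxb : x = b
        · subst hxb
          rw [show posK a k (x :: t) = posK a (k+1) t from by simp [posK, hxa],
              show posK x k (x :: t) = k :: posK x (k+1) t from by simp [posK]]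
          rcases hpa : posK a (k + 1) t with _ | ⟨i, ta⟩
          · rw [mergeCount]
            rw [← hpa, ih (k + 1), ih (k + 1)]
            simp [cnt, hxa]
          · have hki : ¬ i < k := by
              have := posK_ge a t (k + 1) i (by rw [hpa]; exact List.mem_cons_self ..)
              omega
            rw [mergeCount, if_neg hki]
            rw [← hpa, ih (k + 1), ih (k + 1)]
            simp [cnt, hxa]
        · rw [show posK a k (x :: t) = posK a (k+1) t from by simp [posK, hxa],
              show posK b k (x :: t) = posK b (k+1) t from by simp [posK, hxb]]
          rw [ih (k + 1)]
          simp [cnt, hxa, hxb]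

-- A's inner loop over numbers, counted
lemma foldA_length (a b : Int) :
    ∀ (xs : List Int) (marked : List Int) (h : marked ≠ []),
      ((xs.foldl (fun marked number =>
          if number = a ∨ number = b then
            if number ≠ PySem.List.pyGetD marked (-1) 0 then marked ++ [number] else marked
          else marked) marked).length : Int)
        = marked.length + cnt a b (marked.getLast h) xs := by
  intro xs
  induction xs with
  | nil => intro marked h; simp [cnt]
  | cons x t ih =>
      intro marked h
      simp only [List.foldl_cons, cnt]
      rw [PySem.List.pyGetD_neg_one (h := h)]
      by_cases hx : x = a ∨ x = b
      · by_cases hlast : x = marked.getLast h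
        · rw [if_pos hx, if_neg (by simpa using hlast), ih marked h, if_pos hx,
              if_neg (by simpa using hlast), ← hlast]
        · rw [if_pos hx, if_pos hlast, ih (marked ++ [x]) (by simp), if_pos hx, if_pos hlast]
          simp only [List.getLast_append]
          simp
          omega
      · rw [if_neg hx, ih marked h, if_neg hx]

lemma uniqueA_eq_dedup (xs : List Int) : getUniqueNumbersA xs = PySem.List.dedup xs := by
  rw [PySem.List.dedup_eq_ofList]
  unfold PySem.Set.ofList PySem.Set.empty getUniqueNumbersA
  refine Eq.symm (PySem.List.foldl_congr_mem _ _ _ _ ?_)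
  intro acc x _
  unfold PySem.Set.add
  simp

-- indexing into the precomputed positions list
lemma pyGetD_map_posOf (numbers order : List Int) (i : Int)
    (h0 : 0 ≤ i) (hi : i < (order.length : Int)) :
    PySem.List.pyGetD (order.map (posOf numbers)) i [] = posOf numbers (PySem.List.pyGetD order i 0) := by
  rw [PySem.List.pyGetD_eq_getElem (order.map (posOf numbers)) [] h0 (by simpa using hi),
      PySem.List.pyGetD_eq_getElem order 0 h0 hi]
  simp

-- distinct indices into the deduplicated list hold distinct values
lemma order_ne (numbers : List Int) (i j : Int) (h0 : 0 ≤ i) (hij : i < j)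
    (hj : j < ((PySem.List.dedup numbers).length : Int)) :
    PySem.List.pyGetD (PySem.List.dedup numbers) i 0 ≠ PySem.List.pyGetD (PySem.List.dedup numbers) j 0 := by
  have hnd : (PySem.List.dedup numbers).Nodup := PySem.List.nodup_dedup numbers
  rw [PySem.List.pyGetD_eq_getElem (PySem.List.dedup numbers) 0 h0 (by omega),
      PySem.List.pyGetD_eq_getElem (PySem.List.dedup numbers) 0 (by omega) (by omega)]
  intro hEq
  have := (List.Nodup.getElem_inj_iff hnd).mp hEq
  omega

-- per-pair: A's rescan count equals B's two-pointer merge count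
lemma pair_eq (numbers : List Int) (i j : Int) (h0 : 0 ≤ i) (hij : i < j)
    (hj : j < ((PySem.List.dedup numbers).length : Int)) :
    ((numbers.foldl (fun marked number =>
        if number = PySem.List.pyGetD (PySem.List.dedup numbers) i 0 ∨
           number = PySem.List.pyGetD (PySem.List.dedup numbers) j 0 then
          if number ≠ PySem.List.pyGetD marked (-1) 0 then marked ++ [number] else marked
        else marked) ([0] : List Int)).length : Int) - 1
      = mergeCount (PySem.List.pyGetD (PySem.List.dedup numbers) i 0)
          (PySem.List.pyGetD (PySem.List.dedup numbers) j 0) 0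
          (PySem.List.pyGetD ((PySem.List.dedup numbers).map (posOf numbers)) i [])
          (PySem.List.pyGetD ((PySem.List.dedup numbers).map (posOf numbers)) j []) := by
  have hab := order_ne numbers i j h0 hij hj
  rw [foldA_length _ _ numbers [0] (by simp)]
  rw [pyGetD_map_posOf numbers _ i h0 (by omega), pyGetD_map_posOf numbers _ j (by omega) hj]
  rw [posOf_eq_posK, posOf_eq_posK, mergeCount_eq_cnt _ _ hab numbers 0 0]
  simp

-- the inner j-loop: A's pair state stays ([0]) and tracks B's best
lemma jfold (numbers : List Int) (i : Int) (h0 : 0 ≤ i) :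
    ∀ (L : List Int), (∀ j ∈ L, i < j ∧ j < ((PySem.List.dedup numbers).length : Int)) →
    ∀ (m : Int),
      L.foldl (fun (st : Int × List Int) j =>
        (if ((numbers.foldl (fun marked number =>
              if number = PySem.List.pyGetD (PySem.List.dedup numbers) i 0 ∨
                 number = PySem.List.pyGetD (PySem.List.dedup numbers) j 0 then
                if number ≠ PySem.List.pyGetD marked (-1) 0 then marked ++ [number] else marked
              else marked) st.2).length : Int) - 1 > st.1 then
           ((numbers.foldl (fun marked number =>
              if number = PySem.List.pyGetD (PySem.List.dedup numbers) i 0 ∨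
                 number = PySem.List.pyGetD (PySem.List.dedup numbers) j 0 then
                if number ≠ PySem.List.pyGetD marked (-1) 0 then marked ++ [number] else marked
              else marked) st.2).length : Int) - 1 else st.1, ([0] : List Int))) (m, ([0] : List Int))
      = (L.foldl (fun best j =>
          if mergeCount (PySem.List.pyGetD (PySem.List.dedup numbers) i 0)
                     (PySem.List.pyGetD (PySem.List.dedup numbers) j 0) 0
                     (PySem.List.pyGetD ((PySem.List.dedup numbers).map (posOf numbers)) i [])
                     (PySem.List.pyGetD ((PySem.List.dedup numbers).map (posOf numbers)) j []) > best then
            mergeCount (PySem.List.pyGetD (PySem.List.dedup numbers) i 0)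
                     (PySem.List.pyGetD (PySem.List.dedup numbers) j 0) 0
                     (PySem.List.pyGetD ((PySem.List.dedup numbers).map (posOf numbers)) i [])
                     (PySem.List.pyGetD ((PySem.List.dedup numbers).map (posOf numbers)) j [])
          else best) m, ([0] : List Int)) := by
  intro L
  induction L with
  | nil => intro _ m; simp
  | cons j L ihL =>
      intro hL m
      obtain ⟨hij, hj⟩ := hL j (List.mem_cons_self ..)
      simp only [List.foldl_cons]
      rw [← pair_eq numbers i j h0 hij hj]
      exact ihL (fun j' hj' => hL j' (List.mem_cons_of_mem _ hj')) _

-- the outer i-loop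
lemma ifold (numbers : List Int) :
    ∀ (L : List Int), (∀ i ∈ L, 0 ≤ i) →
    ∀ (m : Int),
      L.foldl (fun (st : Int × List Int) i =>
        (PySem.List.pyRange (i + 1) ((PySem.List.dedup numbers).length : Int) 1).foldl
          (fun (st : Int × List Int) j =>
            (if ((numbers.foldl (fun marked number =>
                  if number = PySem.List.pyGetD (PySem.List.dedup numbers) i 0 ∨
                     number = PySem.List.pyGetD (PySem.List.dedup numbers) j 0 then
                    if number ≠ PySem.List.pyGetD marked (-1) 0 then marked ++ [number] else marked
                  else marked) st.2).length : Int) - 1 > st.1 then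
               ((numbers.foldl (fun marked number =>
                  if number = PySem.List.pyGetD (PySem.List.dedup numbers) i 0 ∨
                     number = PySem.List.pyGetD (PySem.List.dedup numbers) j 0 then
                    if number ≠ PySem.List.pyGetD marked (-1) 0 then marked ++ [number] else marked
                  else marked) st.2).length : Int) - 1 else st.1, ([0] : List Int))) st) (m, ([0] : List Int))
      = (L.foldl (fun best i =>
          (PySem.List.pyRange (i + 1) ((PySem.List.dedup numbers).length : Int) 1).foldl
            (fun best j =>
              if mergeCount (PySem.List.pyGetD (PySem.List.dedup numbers) i 0)
                         (PySem.List.pyGetD (PySem.List.dedup numbers) j 0) 0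
                         (PySem.List.pyGetD ((PySem.List.dedup numbers).map (posOf numbers)) i [])
                         (PySem.List.pyGetD ((PySem.List.dedup numbers).map (posOf numbers)) j []) > best then
                mergeCount (PySem.List.pyGetD (PySem.List.dedup numbers) i 0)
                         (PySem.List.pyGetD (PySem.List.dedup numbers) j 0) 0
                         (PySem.List.pyGetD ((PySem.List.dedup numbers).map (posOf numbers)) i [])
                         (PySem.List.pyGetD ((PySem.List.dedup numbers).map (posOf numbers)) j [])
              else best) best) m, ([0] : List Int)) := by
  intro L
  induction L with
  | nil => intro _ m; simp
  | cons i L ihL =>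
      intro hL m
      have h0 : 0 ≤ i := hL i (List.mem_cons_self ..)
      simp only [List.foldl_cons]
      rw [jfold numbers i h0 _ (fun j hj => by
            have := (PySem.List.mem_pyRange_one).mp hj; omega)]
      exact ihL (fun i' hi' => hL i' (List.mem_cons_of_mem _ hi')) _

-- ===== VERDICT (by name: the statement is the Claim_ definition above) =====
theorem getMaxMarked_spec : Claim_equal_getMaxMarked := by
  intro n numbers _
  simp only [Spec_getMaxMarked, getMaxMarked, getMaxMarked_alt]
  rw [uniqueA_eq_dedup]
  rw [ifold numbers _ (fun i hi => by
        have := (PySem.List.mem_pyRange_one).mp hi; omega) 0]
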